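-- pv_equiv track=rewrite | github.com/yujin45/CodingTestStudy | 프로그래머스/0/120815. 피자 나눠 먹기 （2）/피자 나눠 먹기 （2）.py | solution
-- ===== SOURCE A (Python) =====
-- def solution(n):
--     answer = 1
--     pizza = 6
--     while(True):
--         if((pizza*answer)%n ==0):
--             break
--         else:
--             answer+=1
--
--
--     return answer
-- ===== SOURCE B (Python) =====
-- from math import gcd
--
-- def solution(n):
--     return n // gcd(6, n)
-- ===== Notes on version B (the rewrite author's own statement) =====
-- stated objective: faster
-- what changed: Replaced the trial loop over answer=1,2,... with the closed form n // gcd(6, n).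
-- outside the precondition, e.g. on solution(-4): A returns 2, B returns -2
import Mathlib
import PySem

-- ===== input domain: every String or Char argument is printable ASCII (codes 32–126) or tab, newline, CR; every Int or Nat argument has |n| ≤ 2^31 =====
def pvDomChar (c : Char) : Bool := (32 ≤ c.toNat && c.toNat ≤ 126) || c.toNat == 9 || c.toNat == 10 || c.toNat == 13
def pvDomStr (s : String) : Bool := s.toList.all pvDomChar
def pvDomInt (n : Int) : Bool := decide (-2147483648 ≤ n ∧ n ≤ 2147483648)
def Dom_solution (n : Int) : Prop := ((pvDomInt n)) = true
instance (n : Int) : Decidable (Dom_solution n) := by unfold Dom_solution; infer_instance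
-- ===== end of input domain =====

-- B replaces A's linear trial loop by the closed form n // gcd(6, n) (asymptotically faster).

-- ===== PORT A =====
-- the while-True loop, with fuel n.toNat+1 (enough: answer = n always breaks for n > 0)
def solLoop (n : Int) : Nat → Int → Int
  | 0, answer => answer
  | fuel+1, answer =>
      if PySem.Int.mod (6 * answer) n = 0 then answer
      else solLoop n fuel (answer + 1)

def solution (n : Int) : Int := solLoop n (n.natAbs + 1) 1

-- ===== PORT B =====
def solution_alt (n : Int) : Int := PySem.Int.floordiv n (Int.gcd 6 n : Int)

-- ===== PRECONDITION & SPEC =====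
-- Pre_ excludes n = 0 (A raises ZeroDivisionError) and n < 0 (negative person counts are
-- outside the task's natural domain; A's positive answer there is a loop artefact).
def Pre_solution (n : Int) : Prop := 0 < n
instance (n : Int) : Decidable (Pre_solution n) := by unfold Pre_solution; infer_instance
def pvWitness_solution : Int := (7)
def Spec_solution (n : Int) (out : Int) : Prop := out = solution_alt n
instance (n : Int) (out : Int) : Decidable (Spec_solution n out) := by unfold Spec_solution; infer_instance

-- ===== CLAIM (what is proved, stated in full; the proofs are below) =====
def Claim_equal_solution : Prop := ∀ (n : Int), Dom_solution n → Pre_solution n → Spec_solution n (solution n)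

-- ===== LEMMAS AND PROOFS =====

-- Nat form of the key divisibility fact: N ∣ 6*b ↔ N/gcd 6 N ∣ b
theorem nat_key (N b : Nat) (hN : 0 < N) : N ∣ 6 * b ↔ N / Nat.gcd 6 N ∣ b := by
  set g := Nat.gcd 6 N with hg
  have hgpos : 0 < g := Nat.gcd_pos_of_pos_right 6 hN
  have hgd6 : g ∣ 6 := Nat.gcd_dvd_left 6 N
  have hgdN : g ∣ N := Nat.gcd_dvd_right 6 N
  have h6 : 6 = g * (6 / g) := (Nat.mul_div_cancel' hgd6).symm
  have hNe : N = g * (N / g) := (Nat.mul_div_cancel' hgdN).symm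
  have hcop : Nat.Coprime (6 / g) (N / g) := Nat.coprime_div_gcd_div_gcd hgpos
  have hkey : 6 * (N / g) = N * (6 / g) := by
    conv_lhs => rw [h6]
    conv_rhs => rw [hNe]
    ring
  constructor
  · intro h
    have h6b : g * ((6 / g) * b) = 6 * b := by
      rw [← Nat.mul_assoc, Nat.mul_div_cancel' hgd6]
    have h' : g * (N / g) ∣ g * ((6 / g) * b) := by
      rw [h6b, ← hNe]; exact h
    have h2 : N / g ∣ (6 / g) * b := (Nat.mul_dvd_mul_iff_left hgpos).mp h'
    exact (Nat.Coprime.dvd_of_dvd_mul_left hcop.symm) h2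
  · intro ⟨t, ht⟩
    exact ⟨(6 / g) * t, by rw [ht, ← Nat.mul_assoc, ← Nat.mul_assoc, hkey]⟩

-- Int form, via natAbs
theorem int_key (n a : Int) (hn : 0 < n) :
    n ∣ 6 * a ↔ ((n.toNat / Nat.gcd 6 n.toNat : Nat) : Int) ∣ a := by
  have hN : 0 < n.toNat := by omega
  have hcast : ((n.toNat : Int)) = n := Int.toNat_of_nonneg hn.le
  rw [← hcast, Int.natCast_dvd, Int.natCast_dvd]
  have : (6 * a).natAbs = 6 * a.natAbs := by
    simpa using Int.natAbs_mul 6 a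
  rw [this]
  exact nat_key n.toNat a.natAbs hN

-- loop invariant: from answer a with 0 < a ≤ m, enough fuel, the loop returns m
theorem solLoop_eq (n : Int) (hn : 0 < n) (m : Int)
    (hm : m = ((n.toNat / Nat.gcd 6 n.toNat : Nat) : Int)) :
    ∀ fuel (a : Int), 0 < a → a ≤ m → (m - a).toNat < fuel → solLoop n fuel a = m := by
  intro fuel
  induction fuel with
  | zero => intro a _ _ h; omega
  | succ f ih =>
    intro a ha ham hfuel
    by_cases hstop : a = m
    · have hdvd : n ∣ 6 * m := (int_key n m hn).mpr (by rw [hm])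
      have hz : PySem.Int.mod (6 * a) n = 0 := by
        rw [hstop]; exact (PySem.Int.mod_eq_zero_iff_dvd _ _).mpr hdvd
      simp only [solLoop, if_pos hz]; exact hstop
    · have halt : a < m := lt_of_le_of_ne ham hstop
      have hnd : ¬ n ∣ 6 * a := by
        intro h
        have : m ∣ a := by rw [hm]; exact (int_key n a hn).mp h
        have := Int.le_of_dvd ha this
        omega
      have hmod : ¬ PySem.Int.mod (6 * a) n = 0 := by
        intro h; exact hnd ((PySem.Int.mod_eq_zero_iff_dvd _ _).mp h)
      simp only [solLoop, if_neg hmod]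
      exact ih (a + 1) (by omega) (by omega) (by omega)

-- ===== VERDICT (by name: the statement is the Claim_ definition above) =====
theorem solution_spec : Claim_equal_solution := by
  intro n _ hpre
  have hn : 0 < n := hpre
  unfold Spec_solution solution solution_alt
  have hN : 0 < n.toNat := by omega
  set g := Nat.gcd 6 n.toNat with hg
  have hgpos : 0 < g := Nat.gcd_pos_of_pos_right 6 hN
  have hgdN : g ∣ n.toNat := Nat.gcd_dvd_right 6 n.toNat
  have hmposN : 0 < n.toNat / g := Nat.div_pos (Nat.le_of_dvd hN hgdN) hgpos
  have hmleN : n.toNat / g ≤ n.toNat := Nat.div_le_self _ _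
  set m : Int := ((n.toNat / g : Nat) : Int) with hm
  have hmpos : 0 < m := by rw [hm]; exact_mod_cast hmposN
  have hcast : ((n.toNat : Int)) = n := Int.toNat_of_nonneg hn.le
  have habs : n.natAbs = n.toNat := by omega
  have hgcast : Int.gcd 6 n = g := by
    rw [hg, ← habs]; simp [Int.gcd]
  have hright : PySem.Int.floordiv n (Int.gcd 6 n : Int) = m := by
    rw [hgcast, PySem.Int.floordiv_eq_ediv_of_pos (by exact_mod_cast hgpos), ← hcast, hm]
    exact (Int.natCast_div n.toNat g).symm
  rw [hright]
  exact solLoop_eq n hn m hm (n.natAbs + 1) 1 one_pos (by omega) (by omega)
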